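-- pv_equiv track=rewrite | github.com/garricn/premiumflow | roll.py | group_by_ticker
-- ===== SOURCE A (Python) =====
-- from typing import List, Dict, Any
--
-- def group_by_ticker(transactions: List[Dict[str, str]]) -> Dict[str, List[Dict[str, str]]]:
--     """Group transactions by ticker symbol."""
--     grouped = {}
--     for txn in transactions:
--         ticker = txn.get('Instrument', '').strip()
--         if ticker not in grouped:
--             grouped[ticker] = []
--         grouped[ticker].append(txn)
--     return grouped
-- ===== SOURCE B (Python) =====
-- def group_by_ticker(transactions):
--     """Group transactions by ticker symbol (first-appearance key order)."""
--     def key(t):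
--         return t.get('Instrument', '').strip()
--     order = list(dict.fromkeys(key(t) for t in transactions))
--     return {k: [t for t in transactions if key(t) == k] for k in order}
-- ===== Notes on version B (the rewrite author's own statement) =====
-- stated objective: alternative
-- what changed: Replaces the single hash-insertion grouping pass with a two-phase plan: dedup the stripped ticker keys in first-appearance order, then build each group by filtering the whole list per key.
import Mathlib
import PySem

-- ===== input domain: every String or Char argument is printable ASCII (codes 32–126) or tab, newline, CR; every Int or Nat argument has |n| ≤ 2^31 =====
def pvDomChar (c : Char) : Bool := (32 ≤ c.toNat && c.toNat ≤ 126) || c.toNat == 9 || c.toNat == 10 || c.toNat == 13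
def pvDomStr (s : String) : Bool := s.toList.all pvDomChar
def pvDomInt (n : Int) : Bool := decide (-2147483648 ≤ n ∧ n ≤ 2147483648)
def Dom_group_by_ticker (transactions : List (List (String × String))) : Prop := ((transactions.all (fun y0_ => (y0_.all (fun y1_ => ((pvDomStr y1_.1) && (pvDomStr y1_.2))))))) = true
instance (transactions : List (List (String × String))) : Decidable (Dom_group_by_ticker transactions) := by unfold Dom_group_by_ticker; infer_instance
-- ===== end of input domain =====

-- ===== PORT A =====
-- A: a single pass over the transactions, inserting each into a hash map (PySem.Dict),
-- creating an empty group the first time a ticker is seen, then appending.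
def group_by_ticker (transactions : List (List (String × String))) : List (String × List (List (String × String))) :=
  (transactions.foldl (fun grouped txn =>
      let ticker := PySem.Str.strip ((PySem.Dict.mk txn).getD "Instrument" "")
      let grouped := if grouped.contains ticker then grouped else grouped.insert ticker []
      grouped.insert ticker (grouped.getD ticker [] ++ [txn]))
    PySem.Dict.empty).items

-- ===== PORT B =====
-- B: compute the stripped ticker of a transaction
def pvKeyB (txn : List (String × String)) : String :=
  PySem.Str.strip ((PySem.Dict.mk txn).getD "Instrument" "")

-- B: dedup the keys in first-appearance order, then filter the whole list per key.
def group_by_ticker_alt (transactions : List (List (String × String))) : List (String × List (List (String × String))) :=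
  let order := PySem.List.dedup (transactions.map pvKeyB)
  order.map (fun k => (k, transactions.filter (fun t => pvKeyB t == k)))

-- ===== PRECONDITION & SPEC =====
def Spec_group_by_ticker (transactions : List (List (String × String))) (out : List (String × List (List (String × String)))) : Prop := out = group_by_ticker_alt transactions
instance (transactions : List (List (String × String))) (out : List (String × List (List (String × String)))) : Decidable (Spec_group_by_ticker transactions out) := by unfold Spec_group_by_ticker; infer_instance

-- ===== CLAIM (what is proved, stated in full; the proofs are below) =====
def Claim_equal_group_by_ticker : Prop := ∀ (transactions : List (List (String × String))), Dom_group_by_ticker transactions → Spec_group_by_ticker transactions (group_by_ticker transactions)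

-- ===== LEMMAS AND PROOFS =====

-- A's loop body (create-if-absent then append) is exactly a Dict.modify with default [].
theorem pv_stepA_eq_modify (d : PySem.Dict String (List (List (String × String)))) (txn : List (String × String)) :
    (let ticker := PySem.Str.strip ((PySem.Dict.mk txn).getD "Instrument" "")
     let d' := if d.contains ticker then d else d.insert ticker []
     d'.insert ticker (d'.getD ticker [] ++ [txn]))
    = d.modify (pvKeyB txn) [] (· ++ [txn]) := by
  simp only [pvKeyB]
  set t := PySem.Str.strip ((PySem.Dict.mk txn).getD "Instrument" "") with ht
  by_cases h : d.contains t
  · simp [h, PySem.Dict.modify]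
  · simp only [h, Bool.false_eq_true, if_false, PySem.Dict.modify]
    rw [PySem.Dict.insert_insert_self, PySem.Dict.getD_insert_self,
        PySem.Dict.getD_of_not_contains d [] (by simpa using h)]

theorem pv_foldA_eq_foldl_modify (transactions : List (List (String × String))) :
    transactions.foldl (fun grouped txn =>
      let ticker := PySem.Str.strip ((PySem.Dict.mk txn).getD "Instrument" "")
      let grouped := if grouped.contains ticker then grouped else grouped.insert ticker []
      grouped.insert ticker (grouped.getD ticker [] ++ [txn])) PySem.Dict.empty
    = transactions.foldl (fun d txn => d.modify (pvKeyB txn) [] (· ++ [txn])) PySem.Dict.empty := by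
  congr 1
  funext d txn
  exact pv_stepA_eq_modify d txn

-- ===== VERDICT (by name: the statement is the Claim_ definition above) =====
theorem group_by_ticker_spec : Claim_equal_group_by_ticker := by
  intro transactions _
  unfold Spec_group_by_ticker group_by_ticker group_by_ticker_alt
  rw [pv_foldA_eq_foldl_modify]
  set L := transactions
  have hnd : (L.foldl (fun d txn => d.modify (pvKeyB txn) [] (· ++ [txn])) PySem.Dict.empty).keys.Nodup :=
    PySem.Dict.nodup_keys_foldl_modify_key L pvKeyB [] (fun d txn => (· ++ [txn])) PySem.Dict.empty (by simp)
  have hkeys : (L.foldl (fun d txn => d.modify (pvKeyB txn) [] (· ++ [txn])) PySem.Dict.empty).keys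
      = PySem.List.dedup (L.map pvKeyB) := by
    rw [PySem.Dict.keys_foldl_modify_key L pvKeyB [] (fun d txn => (· ++ [txn])) PySem.Dict.empty]
    rw [PySem.List.dedup_eq_ofList]
    simp [PySem.Set.update_nil_left]
  have hget : ∀ c, (L.foldl (fun d txn => d.modify (pvKeyB txn) [] (· ++ [txn])) PySem.Dict.empty).getD c []
      = L.filter (fun t => pvKeyB t == c) := by
    intro c
    have h1 : L.foldl (fun d txn => d.modify (pvKeyB txn) [] (· ++ [txn])) PySem.Dict.empty
        = (L.map (fun t => (pvKeyB t, t))).foldl (fun d p => d.modify p.1 [] (· ++ [p.2])) PySem.Dict.empty := by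
      rw [List.foldl_map]
    rw [h1, PySem.Dict.getD_foldl_modify_append]
    simp [List.filter_map, Function.comp_def]
  rw [PySem.Dict.items_eq_map_keys _ hnd []]
  rw [hkeys]
  exact List.map_congr_left (fun k _ => by rw [hget k])
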